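-- pv_equiv track=rewrite | github.com/aw578/cs6172 | shell_synthesizer.py | _can_construct_number
-- ===== SOURCE A (Python) =====
-- from typing import List, Dict, Optional, Set, Tuple
--
-- def _can_construct_number(target: int, available_numbers: List[int]) -> bool:
--     """
--     Check if target number can be constructed using available numbers and basic arithmetic.
--     This is a simplified check - just see if target appears in available numbers,
--     or can be made with simple operations.
--     """
--     if target in available_numbers:
--         return True
--
--     # Check simple arithmetic combinations (addition, subtraction)
--     for i, num1 in enumerate(available_numbers):
--         for j, num2 in enumerate(available_numbers):
--             if i != j:  # Don't use the same number twice
--                 if num1 + num2 == target or num1 - num2 == target or num2 - num1 == target: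
--                     return True
--
--     return False
-- ===== SOURCE B (Python) =====
-- def _can_construct_number(target, available_numbers):
--     """Hash-based O(n) check: count occurrences once, then for each distinct
--     value test the three possible partners (target-x, x+target, x-target),
--     requiring count >= 2 when the partner equals the value itself."""
--     counts = {}
--     for x in available_numbers:
--         counts[x] = counts.get(x, 0) + 1
--     if target in counts:
--         return True
--     for x in counts:
--         for p in (target - x, x + target, x - target):
--             need = 2 if p == x else 1
--             if counts.get(p, 0) >= need:
--                 return True
--     return False
-- ===== Notes on version B (the rewrite author's own statement) =====
-- stated objective: faster
-- what changed: Replaced the quadratic double loop over index pairs by a one-pass hash counter: for each distinct value x only the three possible partners target-x, x+target, x-target are looked up, with count >= 2 required when the partner equals x.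
import Mathlib
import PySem

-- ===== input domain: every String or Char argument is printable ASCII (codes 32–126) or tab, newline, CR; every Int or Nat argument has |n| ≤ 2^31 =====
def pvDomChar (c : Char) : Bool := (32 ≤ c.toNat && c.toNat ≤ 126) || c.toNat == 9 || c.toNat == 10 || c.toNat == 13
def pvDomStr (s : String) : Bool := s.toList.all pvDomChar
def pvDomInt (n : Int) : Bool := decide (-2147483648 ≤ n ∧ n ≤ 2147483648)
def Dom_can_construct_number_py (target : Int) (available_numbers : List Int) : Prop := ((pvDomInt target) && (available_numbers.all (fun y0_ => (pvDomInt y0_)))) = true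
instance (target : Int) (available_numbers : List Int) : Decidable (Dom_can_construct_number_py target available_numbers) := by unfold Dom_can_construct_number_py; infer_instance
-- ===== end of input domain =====

-- B replaces A's quadratic double loop over index pairs by a one-pass hash counter
-- with three complement lookups per distinct value (objective: faster).

-- ===== PORT A =====
def can_construct_number_py (target : Int) (available_numbers : List Int) : Bool :=
  if available_numbers.contains target then true
  else
    (PySem.List.enumerate available_numbers).any (fun a =>
      (PySem.List.enumerate available_numbers).any (fun b =>
        a.1 != b.1 &&
          (a.2 + b.2 == target || a.2 - b.2 == target || b.2 - a.2 == target)))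

-- ===== PORT B =====
def can_construct_number_py_alt (target : Int) (available_numbers : List Int) : Bool :=
  let counts := PySem.Dict.counter available_numbers
  if counts.contains target then true
  else
    counts.keys.any (fun x =>
      [target - x, x + target, x - target].any (fun p =>
        counts.getD p 0 ≥ (if p == x then 2 else 1)))

-- ===== PRECONDITION & SPEC =====
def Spec_can_construct_number_py (target : Int) (available_numbers : List Int) (out : Bool) : Prop := out = can_construct_number_py_alt target available_numbers
instance (target : Int) (available_numbers : List Int) (out : Bool) : Decidable (Spec_can_construct_number_py target available_numbers out) := by unfold Spec_can_construct_number_py; infer_instance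

-- ===== CLAIM (what is proved, stated in full; the proofs are below) =====
def Claim_equal_can_construct_number_py : Prop := ∀ (target : Int) (available_numbers : List Int), Dom_can_construct_number_py target available_numbers → Spec_can_construct_number_py target available_numbers (can_construct_number_py target available_numbers)

-- ===== LEMMAS AND PROOFS =====

-- the arithmetic relation both programs test for a pair of values (x, p)
def pvRel (t x p : Int) : Prop := x + p = t ∨ x - p = t ∨ p - x = t

-- A's double loop is the index-pair existential
lemma a_iff (t : Int) (l : List Int) :
    can_construct_number_py t l = true ↔
      t ∈ l ∨ ∃ i j : Fin l.length, i ≠ j ∧ pvRel t l[i] l[j] := by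
  unfold can_construct_number_py
  by_cases h : t ∈ l
  · simp [h]
  · simp only [List.contains_eq_mem, h, decide_false, Bool.false_eq_true, if_false,
      List.any_eq_true, PySem.List.mem_enumerate_iff, pvRel]
    constructor
    · rintro ⟨a, ⟨i, hi, rfl⟩, b, ⟨j, hj, rfl⟩, hb⟩
      simp only [bne_iff_ne, Bool.and_eq_true, Bool.or_eq_true, beq_iff_eq, ne_eq] at hb
      refine Or.inr ⟨⟨i, hi⟩, ⟨j, hj⟩, ?_, ?_⟩
      · simp; omega
      · tauto
    · rintro (hmem | ⟨⟨i, hi⟩, ⟨j, hj⟩, hij, hrel⟩)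
      · exact absurd hmem (by simp_all)
      · refine ⟨(0 + i, l[i]), ⟨i, hi, rfl⟩, (0 + j, l[j]), ⟨j, hj, rfl⟩, ?_⟩
        simp only [bne_iff_ne, Bool.and_eq_true, Bool.or_eq_true, beq_iff_eq, ne_eq]
        constructor
        · simp only [Fin.ne_iff_vne] at hij; omega
        · tauto

-- B's counter scan is the value-with-multiplicity existential
lemma b_iff (t : Int) (l : List Int) :
    can_construct_number_py_alt t l = true ↔
      t ∈ l ∨ ∃ x ∈ l, ∃ p, pvRel t x p ∧
        (l.count p : Int) ≥ (if p = x then 2 else 1) := by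
  unfold can_construct_number_py_alt
  by_cases h : t ∈ l
  · simp [PySem.Dict.contains_counter, h]
  · simp only [PySem.Dict.contains_counter, PySem.Dict.keys_counter,
      PySem.Dict.getD_counter]
    rw [if_neg (by simpa using h)]
    simp only [List.any_eq_true, PySem.Set.mem_ofList, List.mem_cons,
      List.not_mem_nil, or_false, ge_iff_le, beq_iff_eq, decide_eq_true_eq, pvRel]
    constructor
    · rintro ⟨x, hx, p, hp, hcnt⟩
      refine Or.inr ⟨x, hx, p, ?_, hcnt⟩
      rcases hp with rfl | rfl | rfl
      · left; ring
      · right; right; ring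
      · right; left; ring
    · rintro (hmem | ⟨x, hx, p, hrel, hcnt⟩)
      · exact absurd hmem h
      · refine ⟨x, hx, p, ?_, hcnt⟩
        rcases hrel with hr | hr | hr
        · left; omega
        · right; right; omega
        · right; left; omega

-- two distinct positions of the same value x = at least two copies of x
lemma two_le_count_iff (l : List Int) (x : Int) :
    2 ≤ l.count x ↔ ∃ i j : Fin l.length, i ≠ j ∧ l[i] = x ∧ l[j] = x := by
  rw [← List.duplicate_iff_two_le_count, List.duplicate_iff_exists_distinct_get]
  constructor
  · rintro ⟨i, j, hij, hi, hj⟩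
    exact ⟨i, j, Fin.ne_of_lt hij, hi.symm, hj.symm⟩
  · rintro ⟨i, j, hij, hi, hj⟩
    rcases lt_or_gt_of_ne hij with h | h
    · exact ⟨i, j, h, hi.symm, hj.symm⟩
    · exact ⟨j, i, h, hj.symm, hi.symm⟩

-- the two existentials coincide
lemma pair_iff (t : Int) (l : List Int) :
    (∃ i j : Fin l.length, i ≠ j ∧ pvRel t l[i] l[j]) ↔
      (∃ x ∈ l, ∃ p, pvRel t x p ∧
        (l.count p : Int) ≥ (if p = x then 2 else 1)) := by
  constructor
  · rintro ⟨i, j, hij, hrel⟩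
    refine ⟨l[i], List.getElem_mem _, l[j], hrel, ?_⟩
    split_ifs with he
    · have h2 : 2 ≤ l.count l[j] := (two_le_count_iff l l[j]).2 ⟨i, j, hij, he.symm, rfl⟩
      exact_mod_cast h2
    · have h1 : 1 ≤ l.count l[j] := List.count_pos_iff.2 (List.getElem_mem _)
      exact_mod_cast h1
  · rintro ⟨x, hx, p, hrel, hcnt⟩
    split_ifs at hcnt with he
    · subst he
      have h2 : 2 ≤ l.count p := by exact_mod_cast hcnt
      obtain ⟨i, j, hij, hi, hj⟩ := (two_le_count_iff l p).1 h2
      exact ⟨i, j, hij, by rw [hi, hj]; exact hrel⟩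
    · have hp : p ∈ l := List.count_pos_iff.1 (by omega)
      obtain ⟨i, hi, hvi⟩ := List.mem_iff_getElem.1 hx
      obtain ⟨j, hj, hvj⟩ := List.mem_iff_getElem.1 hp
      refine ⟨⟨i, hi⟩, ⟨j, hj⟩, ?_, by simp only [Fin.getElem_fin]; rw [hvi, hvj]; exact hrel⟩
      intro hq
      apply he
      have hij : i = j := congrArg Fin.val hq
      subst hij
      rw [← hvi, ← hvj]

-- ===== VERDICT (by name: the statement is the Claim_ definition above) =====
theorem can_construct_number_py_spec : Claim_equal_can_construct_number_py := by
  intro t l _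
  unfold Spec_can_construct_number_py
  have h := ((a_iff t l).trans (or_congr_right (pair_iff t l))).trans (b_iff t l).symm
  cases hA : can_construct_number_py t l <;> cases hB : can_construct_number_py_alt t l <;> simp_all
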